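-- pv_equiv track=rewrite | github.com/nathaliaop/security | trabalho1/main.py | map_possible_keys
-- ===== SOURCE A (Python) =====
-- def fator_number(num):
--   factors = []
--
--   i = 1
--   while i*i <= num:
--     if num % i == 0:
--       factors.append(i)
--
--       if i != num//i:
--         factors.append(num//i)
--
--     i += 1
--
--   return factors
--
-- def map_possible_keys(sequence_frequency):
--   possible_keys = {}
--   for _, value in sequence_frequency.items():
--     for factor in fator_number(value):
--       if factor in possible_keys:
--         possible_keys[factor] += 1
--       else:
--         possible_keys[factor] = 1
--
--   return sorted(possible_keys.items(), reverse=True, key=lambda kv: (kv[1], kv[0]))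
-- ===== SOURCE B (Python) =====
-- def map_possible_keys(sequence_frequency):
--   # histogram of the distinct positive values, so each value is factored once
--   freq = {}
--   for v in sequence_frequency.values():
--     if v > 0:
--       freq[v] = freq.get(v, 0) + 1
--   counts = {}
--   for v, mult in freq.items():
--     lows = []
--     d = 1
--     while d * d <= v:
--       if v % d == 0:
--         lows.append(d)
--       d += 1
--     for d in lows:
--       counts[d] = counts.get(d, 0) + mult
--       e = v // d
--       if e != d:
--         counts[e] = counts.get(e, 0) + mult
--   return sorted(counts.items(), reverse=True, key=lambda kv: (kv[1], kv[0]))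
-- ===== Notes on version B (the rewrite author's own statement) =====
-- stated objective: faster
-- what changed: B first builds a histogram of the distinct positive values so each value is factored once with its multiplicity, collects only the low divisors (d*d <= v) in a list and derives each cofactor v//d from it, and merges weighted counts with dict.get, instead of A's per-occurrence interleaved-factor-list plus membership-branch dict increments.
import Mathlib
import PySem

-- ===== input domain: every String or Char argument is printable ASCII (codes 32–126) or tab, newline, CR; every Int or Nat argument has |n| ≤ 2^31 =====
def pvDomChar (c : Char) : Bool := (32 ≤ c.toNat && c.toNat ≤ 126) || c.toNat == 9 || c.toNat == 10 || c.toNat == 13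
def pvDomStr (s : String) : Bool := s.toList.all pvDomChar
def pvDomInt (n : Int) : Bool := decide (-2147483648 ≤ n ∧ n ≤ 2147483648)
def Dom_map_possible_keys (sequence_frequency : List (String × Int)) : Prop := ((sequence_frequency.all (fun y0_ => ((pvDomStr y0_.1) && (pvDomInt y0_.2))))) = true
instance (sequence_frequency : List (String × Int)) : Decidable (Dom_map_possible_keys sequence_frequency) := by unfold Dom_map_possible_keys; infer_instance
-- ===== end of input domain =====

-- B groups the positive values into a histogram first (each distinct value is factored once and its
-- count merged with a weight) and derives each cofactor from a low-divisor list; same return value.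

-- ===== PORT A =====
-- while i*i <= num: append i (and num//i when different); i += 1
def fatorAux (num : Int) (i : Int) (factors : List Int) : List Int :=
  if h : i * i ≤ num then
    fatorAux num (i + 1)
      (if PySem.Int.mod num i = 0 then
        (if i ≠ PySem.Int.floordiv num i then
          (factors ++ [i]) ++ [PySem.Int.floordiv num i]
        else factors ++ [i])
      else factors)
  else factors
termination_by (num + 1 - i).toNat
decreasing_by
  have hi : i ≤ num := by nlinarith [sq_nonneg i]
  omega

def fator_number (num : Int) : List Int := fatorAux num 1 []

def map_possible_keys (sequence_frequency : List (String × Int)) : List (Int × Int) :=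
  let possible_keys : PySem.Dict Int Int :=
    (PySem.Dict.ofList sequence_frequency).items.foldl
      (fun pk p =>
        (fator_number p.2).foldl
          (fun pk factor =>
            if pk.contains factor then pk.insert factor (pk.getD factor 0 + 1)
            else pk.insert factor 1)
          pk)
      PySem.Dict.empty
  PySem.List.sorted2 possible_keys.items (fun kv => kv.2) (fun kv => kv.1) true

-- ===== PORT B =====
-- while d*d <= v: if v % d == 0: lows.append(d)
def lowsAux (v : Int) (d : Int) (lows : List Int) : List Int :=
  if h : d * d ≤ v then
    lowsAux v (d + 1) (if PySem.Int.mod v d = 0 then lows ++ [d] else lows)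
  else lows
termination_by (v + 1 - d).toNat
decreasing_by
  have hd : d ≤ v := by nlinarith [sq_nonneg d]
  omega

def map_possible_keys_alt (sequence_frequency : List (String × Int)) : List (Int × Int) :=
  let freq : PySem.Dict Int Int :=
    (PySem.Dict.ofList sequence_frequency).values.foldl
      (fun fr v => if 0 < v then fr.insert v (fr.getD v 0 + 1) else fr)
      PySem.Dict.empty
  let counts : PySem.Dict Int Int :=
    freq.items.foldl
      (fun cn p =>
        (lowsAux p.1 1 []).foldl
          (fun cn d =>
            let cn' := cn.insert d (cn.getD d 0 + p.2)
            let e := PySem.Int.floordiv p.1 d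
            if e ≠ d then cn'.insert e (cn'.getD e 0 + p.2) else cn')
          cn)
      PySem.Dict.empty
  PySem.List.sorted2 counts.items (fun kv => kv.2) (fun kv => kv.1) true

-- ===== PRECONDITION & SPEC =====
def Spec_map_possible_keys (sequence_frequency : List (String × Int)) (out : List (Int × Int)) : Prop := out = map_possible_keys_alt sequence_frequency
instance (sequence_frequency : List (String × Int)) (out : List (Int × Int)) : Decidable (Spec_map_possible_keys sequence_frequency out) := by unfold Spec_map_possible_keys; infer_instance

-- ===== CLAIM (what is proved, stated in full; the proofs are below) =====
def Claim_equal_map_possible_keys : Prop := ∀ (sequence_frequency : List (String × Int)), Dom_map_possible_keys sequence_frequency → Spec_map_possible_keys sequence_frequency (map_possible_keys sequence_frequency)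

-- ===== LEMMAS AND PROOFS =====
def gpair (v d : Int) : List Int :=
  if d ≠ PySem.Int.floordiv v d then [d, PySem.Int.floordiv v d] else [d]

theorem lowsAux_acc (v i : Int) (acc : List Int) :
    lowsAux v i acc = acc ++ lowsAux v i [] := by
  conv_lhs => rw [lowsAux]
  conv_rhs => rw [lowsAux]
  by_cases h : i * i ≤ v
  · rw [dif_pos h, dif_pos h,
      lowsAux_acc v (i+1) (if PySem.Int.mod v i = 0 then acc ++ [i] else acc),
      lowsAux_acc v (i+1) (if PySem.Int.mod v i = 0 then [] ++ [i] else [])]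
    split <;> simp
  · rw [dif_neg h, dif_neg h]; simp
termination_by (v + 1 - i).toNat
decreasing_by
  all_goals (have hd : i ≤ v := by nlinarith [sq_nonneg i]); all_goals omega

theorem fatorAux_eq (v i : Int) (acc : List Int) :
    fatorAux v i acc = acc ++ (lowsAux v i []).flatMap (gpair v) := by
  conv_lhs => rw [fatorAux]
  conv_rhs => rw [lowsAux]
  by_cases h : i * i ≤ v
  · rw [dif_pos h, dif_pos h, fatorAux_eq v (i+1) _,
      lowsAux_acc v (i+1) (if PySem.Int.mod v i = 0 then [] ++ [i] else [])]
    by_cases hm : PySem.Int.mod v i = 0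
    · simp only [hm, if_true, List.nil_append, List.flatMap_append, List.flatMap_cons,
        List.flatMap_nil, List.append_nil, gpair]
      split <;> simp
    · simp [hm]
  · rw [dif_neg h, dif_neg h]; simp
termination_by (v + 1 - i).toNat
decreasing_by
  all_goals (have hd : i ≤ v := by nlinarith [sq_nonneg i]); all_goals omega

theorem mem_lowsAux (v i k : Int) (acc : List Int) :
    1 ≤ i → (k ∈ lowsAux v i acc ↔ k ∈ acc ∨ (i ≤ k ∧ k * k ≤ v ∧ k ∣ v)) := by
  fun_induction lowsAux v i acc
  · rename_i i acc h ih
    intro hi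
    simp only [dite_eq_ite] at ih
    rw [ih (by omega)]
    have hkd : PySem.Int.mod v i = 0 ↔ i ∣ v := PySem.Int.mod_eq_zero_iff_dvd v i
    by_cases hd : i ∣ v
    · simp only [hkd, hd, if_true]
      simp only [List.mem_append, List.mem_singleton]
      constructor
      · rintro ((hk | rfl) | ⟨h1,h2,h3⟩)
        · exact Or.inl hk
        · exact Or.inr ⟨le_refl _, h, hd⟩
        · exact Or.inr ⟨by omega, h2, h3⟩
      · rintro (hk | ⟨h1,h2,h3⟩)
        · exact Or.inl (Or.inl hk)
        · rcases eq_or_lt_of_le h1 with rfl | hlt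
          · exact Or.inl (Or.inr rfl)
          · exact Or.inr ⟨by omega, h2, h3⟩
    · rw [if_neg (fun hmod => hd (hkd.mp hmod))]
      constructor
      · rintro (hk | ⟨h1,h2,h3⟩)
        · exact Or.inl hk
        · exact Or.inr ⟨by omega, h2, h3⟩
      · rintro (hk | ⟨h1,h2,h3⟩)
        · exact Or.inl hk
        · refine Or.inr ⟨?_, h2, h3⟩
          rcases eq_or_lt_of_le h1 with rfl | hlt
          · exact absurd h3 hd
          · omega
  · rename_i i acc h
    intro hi
    simp only [iff_self_or]
    rintro ⟨h1, h2, h3⟩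
    have : i * i ≤ k * k := by nlinarith
    omega

theorem pairwise_lowsAux (v i : Int) (acc : List Int) :
    acc.Pairwise (· < ·) → (∀ a ∈ acc, a < i) → (lowsAux v i acc).Pairwise (· < ·) := by
  fun_induction lowsAux v i acc
  · rename_i i acc h ih
    intro hp hlt
    simp only [dite_eq_ite] at ih
    apply ih
    · split
      · exact List.pairwise_append.mpr ⟨hp, List.pairwise_singleton _ _, by
          intro a ha b hb; simp at hb; subst hb; exact hlt a ha⟩
      · exact hp
    · intro a ha
      split at ha
      · rcases List.mem_append.mp ha with h' | h'
        · exact lt_trans (hlt a h') (by omega)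
        · simp at h'; omega
      · exact lt_trans (hlt a ha) (by omega)
  · rename_i i acc h
    exact fun hp _ => hp

theorem count_flatMap_eq (g : Int → List Int) (l : List Int) (k : Int) :
    ((l.flatMap g).count k) = (l.map (fun d => (g d).count k)).sum := by
  induction l with
  | nil => simp
  | cons d l ih => simp [List.count_append, ih]

theorem sum_map_indicator_one (l : List Int) (f : Int → Nat) (d0 : Int)
    (hnd : l.Nodup) (hmem : d0 ∈ l) (h1 : f d0 = 1)
    (h0 : ∀ d ∈ l, d ≠ d0 → f d = 0) : (l.map f).sum = 1 := by
  induction l with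
  | nil => simp at hmem
  | cons a l ih =>
    rcases List.mem_cons.mp hmem with rfl | hmem'
    · simp only [List.map_cons, List.sum_cons, h1]
      have : ∀ x ∈ l.map f, x = 0 := by
        rintro x hx
        obtain ⟨d, hd, rfl⟩ := List.mem_map.mp hx
        exact h0 d (List.mem_cons_of_mem _ hd) (fun h => (List.nodup_cons.mp hnd).1 (h ▸ hd))
      rw [List.sum_eq_zero this]
      omega
    · have ha : f a = 0 := h0 a List.mem_cons_self (fun h => (List.nodup_cons.mp hnd).1 (h ▸ hmem'))
      simp only [List.map_cons, List.sum_cons, ha, Nat.zero_add]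
      exact ih (List.nodup_cons.mp hnd).2 hmem'
        (fun d hd hne => h0 d (List.mem_cons_of_mem _ hd) hne)

theorem nodup_lows (v : Int) : (lowsAux v 1 []).Nodup :=
  (pairwise_lowsAux v 1 [] List.Pairwise.nil (by simp)).imp ne_of_lt

theorem count_gpair (v d k : Int) :
    (gpair v d).count k =
      (if d = k then 1 else 0) + (if PySem.Int.floordiv v d = k ∧ PySem.Int.floordiv v d ≠ d then 1 else 0) := by
  unfold gpair
  by_cases h : d ≠ PySem.Int.floordiv v d
  · rw [if_pos h]
    simp only [List.count_cons, List.count_nil, beq_iff_eq]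
    split_ifs <;> omega
  · rw [if_neg h]
    rw [not_ne_iff] at h
    simp only [List.count_cons, List.count_nil, beq_iff_eq]
    split_ifs <;> omega

theorem mem_lows (v : Int) (d : Int) :
    d ∈ lowsAux v 1 [] ↔ 1 ≤ d ∧ d * d ≤ v ∧ d ∣ v := by
  rw [mem_lowsAux v 1 d [] le_rfl]; simp

theorem count_fator (v k : Int) :
    (fatorAux v 1 []).count k = if 0 < v ∧ 0 < k ∧ k ∣ v then 1 else 0 := by
  rw [fatorAux_eq, List.nil_append, count_flatMap_eq]
  by_cases hv : 0 < v
  case neg =>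
    have hlow : lowsAux v 1 [] = [] := by
      rw [lowsAux, dif_neg (by omega : ¬ (1:Int) * 1 ≤ v)]
    rw [hlow]
    simp only [List.map_nil, List.sum_nil]
    rw [if_neg (fun hc => hv hc.1)]
  case pos =>
    by_cases hk : 0 < k ∧ k ∣ v
    case pos =>
      obtain ⟨hk0, hkdvd⟩ := hk
      have hq : v / k * k = v := Int.ediv_mul_cancel hkdvd
      set q := v / k with hqdef
      have hq0 : 0 < q := by nlinarith
      rw [if_pos ⟨hv, hk0, hkdvd⟩]
      by_cases hsq : k * k ≤ v
      · apply sum_map_indicator_one _ _ k (nodup_lows v)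
        · exact (mem_lows v k).mpr ⟨by omega, hsq, hkdvd⟩
        · rw [count_gpair, if_pos rfl, if_neg (fun hc => hc.2 hc.1)]
        · intro d hd hne
          obtain ⟨hd1, hdsq, hddvd⟩ := (mem_lows v d).mp hd
          rw [count_gpair, if_neg hne, if_neg]
          rintro ⟨he, -⟩
          have hfd : PySem.Int.floordiv v d = v / d := PySem.Int.floordiv_eq_ediv_of_pos (by omega)
          have hvd : v / d * d = v := Int.ediv_mul_cancel hddvd
          rw [hfd] at he
          have hkd : k * d = v := by rw [← he]; exact hvd
          have hdq : d = q := mul_left_cancel₀ (by omega : (k:Int) ≠ 0)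
            (by nlinarith)
          subst hdq
          have h1 : q ≤ k := by nlinarith
          have h2 : k ≤ q := by nlinarith
          exact hne (by omega)
      · apply sum_map_indicator_one _ _ q (nodup_lows v)
        · exact (mem_lows v q).mpr ⟨by omega, by nlinarith, ⟨k, hq.symm⟩⟩
        · have hfd : PySem.Int.floordiv v q = v / q := PySem.Int.floordiv_eq_ediv_of_pos (by omega)
          have hvqk : v / q = k := by
            have h' : q * k / q = k := Int.mul_ediv_cancel_left k (ne_of_gt hq0)
            rw [hq] at h'
            exact h'
          have hqk : q ≠ k := by nlinarith
          rw [count_gpair, if_neg hqk, if_pos ⟨by rw [hfd, hvqk], by rw [hfd, hvqk]; exact fun hh => hqk hh.symm⟩]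
        · intro d hd hne
          obtain ⟨hd1, hdsq, hddvd⟩ := (mem_lows v d).mp hd
          have hdk : d ≠ k := by intro rfl; omega
          rw [count_gpair, if_neg hdk, if_neg]
          rintro ⟨he, -⟩
          have hfd : PySem.Int.floordiv v d = v / d := PySem.Int.floordiv_eq_ediv_of_pos (by omega)
          have hvd : v / d * d = v := Int.ediv_mul_cancel hddvd
          rw [hfd] at he
          have hkd : k * d = v := by rw [← he]; exact hvd
          exact hne (mul_left_cancel₀ (by omega : (k:Int) ≠ 0) (by nlinarith))
    case neg =>
      rw [if_neg (fun hc => hk ⟨hc.2.1, hc.2.2⟩)]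
      apply List.sum_eq_zero
      rintro x hx
      obtain ⟨d, hd, rfl⟩ := List.mem_map.mp hx
      obtain ⟨hd1, hdsq, hddvd⟩ := (mem_lows v d).mp hd
      have hfd : PySem.Int.floordiv v d = v / d := PySem.Int.floordiv_eq_ediv_of_pos (by omega)
      have hvd : v / d * d = v := Int.ediv_mul_cancel hddvd
      rw [count_gpair, if_neg (fun hdk => hk (by subst hdk; exact ⟨by omega, hddvd⟩)), if_neg]
      · rfl
      · rintro ⟨he, -⟩
        rw [hfd] at he
        have hkd : k * d = v := by rw [← he]; exact hvd
        exact hk ⟨by nlinarith, ⟨d, hkd.symm⟩⟩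

theorem getD_foldl_wIns (m : Int) (l : List Int) (d0 : PySem.Dict Int Int) (k : Int) :
    ((l.foldl (fun d x => d.insert x (d.getD x 0 + m)) d0).getD k 0)
      = d0.getD k 0 + m * (l.count k : Int) := by
  induction l generalizing d0 with
  | nil => simp
  | cons a l ih =>
    rw [List.foldl_cons, ih, PySem.Dict.getD_insert]
    by_cases h : k = a
    · subst h; rw [if_pos rfl, List.count_cons_self]; push_cast; ring
    · rw [if_neg h, List.count_cons_of_ne (fun hh => h ((by simpa using hh : a = k)).symm)]

theorem inner_eq_fator_fold (v m : Int) (cn : PySem.Dict Int Int) :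
    ((lowsAux v 1 []).foldl
      (fun cn d =>
        let cn' := cn.insert d (cn.getD d 0 + m)
        let e := PySem.Int.floordiv v d
        if e ≠ d then cn'.insert e (cn'.getD e 0 + m) else cn') cn)
    = (fatorAux v 1 []).foldl (fun d x => d.insert x (d.getD x 0 + m)) cn := by
  rw [fatorAux_eq, List.nil_append, List.foldl_flatMap]
  apply PySem.List.foldl_congr_mem
  intro acc d _
  simp only [gpair]
  by_cases h : d = PySem.Int.floordiv v d
  · rw [if_neg (not_ne_iff.mpr h), if_neg (not_ne_iff.mpr h.symm)]
    simp
  · rw [if_pos h, if_pos (Ne.symm h)]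
    simp

theorem getD_outer (ps : List (Int × Int)) (cn0 : PySem.Dict Int Int) (k : Int) :
    ((ps.foldl (fun cn p => (fatorAux p.1 1 []).foldl (fun d x => d.insert x (d.getD x 0 + p.2)) cn) cn0).getD k 0)
      = cn0.getD k 0 + (ps.map (fun p => p.2 * ((fatorAux p.1 1 []).count k : Int))).sum := by
  induction ps generalizing cn0 with
  | nil => simp
  | cons p ps ih =>
    rw [List.foldl_cons, ih, getD_foldl_wIns]
    simp only [List.map_cons, List.sum_cons]
    ring

theorem keys_outer (ps : List (Int × Int)) (cn0 : PySem.Dict Int Int) :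
    (ps.foldl (fun cn p => (fatorAux p.1 1 []).foldl (fun d x => d.insert x (d.getD x 0 + p.2)) cn) cn0).keys
      = PySem.Set.update cn0.keys (ps.flatMap (fun p => fatorAux p.1 1 [])) := by
  induction ps generalizing cn0 with
  | nil => simp [PySem.Set.update]
  | cons p ps ih =>
    rw [List.foldl_cons, ih, PySem.Dict.keys_foldl_insert]
    simp only [List.flatMap_cons, PySem.Set.update, List.foldl_append]

theorem nodup_keys_outer (ps : List (Int × Int)) (cn0 : PySem.Dict Int Int)
    (h : cn0.keys.Nodup) :
    (ps.foldl (fun cn p => (fatorAux p.1 1 []).foldl (fun d x => d.insert x (d.getD x 0 + p.2)) cn) cn0).keys.Nodup := by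
  induction ps generalizing cn0 with
  | nil => exact h
  | cons p ps ih =>
    exact ih _ (PySem.Dict.nodup_keys_foldl_insert _ _ _ h)

theorem sum_ind_eq_countP (l : List Int) (P : Int → Prop) [DecidablePred P] :
    (l.map (fun v => if P v then (1:Nat) else 0)).sum = l.countP (fun v => decide (P v)) := by
  induction l with
  | nil => simp
  | cons a l ih =>
    by_cases h : P a <;> simp [h, ih, Nat.add_comm]

theorem sum_mul_ind_eq_sum_filter (l : List Int) (c : Int → Int) (P : Int → Prop) [DecidablePred P] :
    (l.map (fun v => c v * (if P v then (1:Int) else 0))).sum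
      = ((l.filter (fun v => decide (P v))).map c).sum := by
  induction l with
  | nil => simp
  | cons a l ih =>
    simp only [List.map_cons, List.sum_cons, List.filter_cons]
    by_cases h : P a
    · rw [if_pos h, mul_one, if_pos (by simpa using h), List.map_cons, List.sum_cons, ih]
    · rw [if_neg h, mul_zero, if_neg (by simpa using h), ih, zero_add]

theorem A_dict_eq (sf : List (String × Int)) :
    ((PySem.Dict.ofList sf).items.foldl
      (fun pk p =>
        (fatorAux p.2 1 []).foldl
          (fun pk factor =>
            if pk.contains factor then pk.insert factor (pk.getD factor 0 + 1)
            else pk.insert factor 1)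
          pk)
      PySem.Dict.empty)
    = PySem.Dict.counter (((PySem.Dict.ofList sf).values).flatMap (fun v => fatorAux v 1 [])) := by
  have hstep : ∀ (pk : PySem.Dict Int Int) (f : Int),
      (if pk.contains f then pk.insert f (pk.getD f 0 + 1) else pk.insert f 1)
        = pk.insert f (pk.getD f 0 + 1) := by
    intro pk f
    by_cases hc : pk.contains f
    · rw [if_pos hc]
    · rw [if_neg (by simpa using hc), PySem.Dict.getD_of_not_contains pk 0 (by simpa using hc)]
      norm_num
  have h1 : ((PySem.Dict.ofList sf).items.foldl
      (fun pk p =>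
        (fatorAux p.2 1 []).foldl
          (fun pk factor =>
            if pk.contains factor then pk.insert factor (pk.getD factor 0 + 1)
            else pk.insert factor 1)
          pk)
      PySem.Dict.empty)
      = (PySem.Dict.ofList sf).items.foldl
          (fun pk p => (fatorAux p.2 1 []).foldl (fun pk f => pk.insert f (pk.getD f 0 + 1)) pk)
          (PySem.Dict.empty : PySem.Dict Int Int) := by
    apply PySem.List.foldl_congr_mem
    intro acc p _
    apply PySem.List.foldl_congr_mem
    intro acc2 f _
    exact hstep acc2 f
  rw [h1]
  have hv : (PySem.Dict.ofList sf).values = (PySem.Dict.ofList sf).items.map (fun p => p.2) := rfl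
  rw [hv, ← PySem.Dict.foldl_insert_getD_add_one_eq_counter, List.foldl_flatMap, List.foldl_map]

theorem B_freq_eq (sf : List (String × Int)) :
    ((PySem.Dict.ofList sf).values.foldl
      (fun fr v => if 0 < v then fr.insert v (fr.getD v 0 + 1) else fr)
      (PySem.Dict.empty : PySem.Dict Int Int))
    = PySem.Dict.counter ((PySem.Dict.ofList sf).values.filter (fun v => decide (0 < v))) := by
  rw [PySem.List.foldl_ite_eq_foldl_filter (fun v : Int => 0 < v)
    (fun (fr : PySem.Dict Int Int) v => fr.insert v (fr.getD v 0 + 1))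
    ((PySem.Dict.ofList sf).values) PySem.Dict.empty,
    PySem.Dict.foldl_insert_getD_add_one_eq_counter]

theorem B_counts_eq (ps : List (Int × Int)) :
    (ps.foldl
      (fun cn p =>
        (lowsAux p.1 1 []).foldl
          (fun cn d =>
            let cn' := cn.insert d (cn.getD d 0 + p.2)
            let e := PySem.Int.floordiv p.1 d
            if e ≠ d then cn'.insert e (cn'.getD e 0 + p.2) else cn')
          cn)
      (PySem.Dict.empty : PySem.Dict Int Int))
    = ps.foldl (fun cn p => (fatorAux p.1 1 []).foldl (fun d x => d.insert x (d.getD x 0 + p.2)) cn)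
        (PySem.Dict.empty : PySem.Dict Int Int) := by
  apply PySem.List.foldl_congr_mem
  intro acc p _
  exact inner_eq_fator_fold p.1 p.2 acc

theorem grand_sum (l : List Int) (k : Int) :
    (((PySem.Dict.counter (l.filter (fun v => decide (0 < v)))).items).map
        (fun p => p.2 * ((fatorAux p.1 1 []).count k : Int))).sum
      = ((l.flatMap (fun v => fatorAux v 1 [])).count k : Int) := by
  have hind : ∀ v : Int, ((fatorAux v 1 []).count k : Int)
      = if 0 < v ∧ 0 < k ∧ k ∣ v then (1:Int) else 0 := by
    intro v; rw [count_fator]; split_ifs <;> simp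
  rw [PySem.Dict.items_counter, List.map_map]
  have hbody : ((fun p : Int × Int => p.2 * ((fatorAux p.1 1 []).count k : Int)) ∘
      (fun v => (v, ((l.filter (fun v => decide (0 < v))).count v : Int))))
      = fun v => ((l.filter (fun v => decide (0 < v))).count v : Int) *
          (if 0 < v ∧ 0 < k ∧ k ∣ v then (1:Int) else 0) := by
    funext v; simp [hind]
  rw [hbody, sum_mul_ind_eq_sum_filter]
  have hperm : (PySem.Set.ofList (l.filter (fun v => decide (0 < v)))).Perm
      (l.filter (fun v => decide (0 < v))).dedup :=
    (List.perm_ext_iff_of_nodup (PySem.Set.nodup_ofList _) (List.nodup_dedup _)).mpr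
      (fun a => by rw [PySem.Set.mem_ofList, List.mem_dedup])
  rw [List.Perm.sum_eq (List.Perm.map _ (List.Perm.filter _ hperm))]
  have hcast : (((l.filter (fun v => decide (0 < v))).dedup.filter
        (fun v => decide (0 < v ∧ 0 < k ∧ k ∣ v))).map
        (fun v => ((l.filter (fun v => decide (0 < v))).count v : Int))).sum
      = ((((l.filter (fun v => decide (0 < v))).dedup.filter
        (fun v => decide (0 < v ∧ 0 < k ∧ k ∣ v))).map
        (fun v => (l.filter (fun v => decide (0 < v))).count v)).sum : Int) := by
    rw [Nat.cast_list_sum, List.map_map]; rfl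
  rw [hcast, List.sum_map_count_dedup_filter_eq_countP]
  rw [count_flatMap_eq]
  have hmap : (l.map (fun v => (fatorAux v 1 []).count k))
      = l.map (fun v => if 0 < v ∧ 0 < k ∧ k ∣ v then (1:Nat) else 0) := by
    apply List.map_congr_left; intro v _; rw [count_fator]
  rw [hmap, sum_ind_eq_countP, List.countP_filter]
  congr 1
  apply List.countP_congr
  intro v _
  by_cases h1 : 0 < v <;> by_cases h2 : 0 < k ∧ k ∣ v <;> simp [h1, h2]

theorem insertBy_congr {α : Type} (f g : α → α → Bool) (h : ∀ a b, f a b = g a b)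
    (x : α) (l : List α) : PySem.List.insertBy f x l = PySem.List.insertBy g x l := by
  induction l with
  | nil => simp [PySem.List.insertBy]
  | cons y ys ih => simp only [PySem.List.insertBy, h, ih]

theorem cmp_eq (a b : Int × Int) :
    (decide (a.2 < b.2) || (!decide (b.2 < a.2) && decide (a.1 < b.1)))
      = decide (toLex (a.2, a.1) < toLex (b.2, b.1)) := by
  by_cases h1 : a.2 < b.2 <;> by_cases h2 : b.2 < a.2 <;> by_cases h3 : a.1 < b.1 <;>
    simp [h1, h2, h3, Prod.Lex.lt_iff] <;> omega

theorem sorted2_bridge (xs : List (Int × Int)) :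
    PySem.List.sorted2 xs (fun kv => kv.2) (fun kv => kv.1) true
      = PySem.List.sorted xs (fun p => toLex (p.2, p.1)) true := by
  unfold PySem.List.sorted2 PySem.List.sorted
  apply PySem.List.foldl_congr_mem
  intro acc x _
  exact insertBy_congr _ _ (fun a b => cmp_eq b a) x acc

theorem sorted2_rev_eq_of_perm (xs ys : List (Int × Int)) (h : xs.Perm ys) :
    PySem.List.sorted2 xs (fun kv => kv.2) (fun kv => kv.1) true
      = PySem.List.sorted2 ys (fun kv => kv.2) (fun kv => kv.1) true := by
  rw [sorted2_bridge, sorted2_bridge]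
  apply PySem.List.eq_of_perm_of_pairwise_le_of_injective
    (key := fun p : Int × Int => OrderDual.toDual (toLex (p.2, p.1)))
  · intro p q hpq
    simp only [OrderDual.toDual_inj] at hpq
    have h2 := congrArg (fun z => (ofLex z)) hpq
    simp at h2
    exact Prod.ext h2.2 h2.1
  · exact (PySem.List.sorted_perm xs _ true).trans (h.trans (PySem.List.sorted_perm ys _ true).symm)
  · have := PySem.List.sorted_pairwise_rev xs (fun p : Int × Int => toLex (p.2, p.1))
    exact this.imp (fun hab => by simpa using hab)
  · have := PySem.List.sorted_pairwise_rev ys (fun p : Int × Int => toLex (p.2, p.1))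
    exact this.imp (fun hab => by simpa using hab)

theorem mem_fator (v k : Int) :
    k ∈ fatorAux v 1 [] ↔ (0 < v ∧ 0 < k ∧ k ∣ v) := by
  rw [← List.count_pos_iff, count_fator]
  split_ifs with h <;> simp [h]

theorem items_perm (sf : List (String × Int)) :
    (PySem.Dict.counter (((PySem.Dict.ofList sf).values).flatMap (fun v => fatorAux v 1 []))).items.Perm
      (((PySem.Dict.counter ((PySem.Dict.ofList sf).values.filter (fun v => decide (0 < v)))).items).foldl
        (fun cn p => (fatorAux p.1 1 []).foldl (fun d x => d.insert x (d.getD x 0 + p.2)) cn)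
        (PySem.Dict.empty : PySem.Dict Int Int)).items := by
  set l := (PySem.Dict.ofList sf).values with hl
  set L := l.flatMap (fun v => fatorAux v 1 []) with hL
  set pv := l.filter (fun v => decide (0 < v)) with hpv
  set ps := (PySem.Dict.counter pv).items with hps
  set B := ps.foldl
    (fun cn p => (fatorAux p.1 1 []).foldl (fun d x => d.insert x (d.getD x 0 + p.2)) cn)
    (PySem.Dict.empty : PySem.Dict Int Int) with hB
  have hempty_keys : (PySem.Dict.empty : PySem.Dict Int Int).keys = [] := by
    simp [PySem.Dict.keys_empty]
  have hnodupB : B.keys.Nodup := by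
    rw [hB]; exact nodup_keys_outer _ _ (by rw [hempty_keys]; exact List.nodup_nil)
  have hkeysB : B.keys = PySem.Set.ofList (ps.flatMap (fun p => fatorAux p.1 1 [])) := by
    rw [hB, keys_outer, hempty_keys]
    rfl
  have hgetD : ∀ k, B.getD k 0 = (L.count k : Int) := by
    intro k
    rw [hB, getD_outer, PySem.Dict.getD_empty]
    rw [hps, hpv, grand_sum]
    rw [zero_add]
  have hitemsA : (PySem.Dict.counter L).items
      = (PySem.Set.ofList L).map (fun k => (k, (L.count k : Int))) :=
    PySem.Dict.items_counter L
  have hitemsB : B.items = B.keys.map (fun k => (k, (L.count k : Int))) := by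
    rw [PySem.Dict.items_eq_map_keys B hnodupB 0]
    apply List.map_congr_left
    intro k _
    rw [hgetD k]
  have hmem : ∀ k, k ∈ PySem.Set.ofList L ↔ k ∈ B.keys := by
    intro k
    rw [hkeysB, PySem.Set.mem_ofList, PySem.Set.mem_ofList, List.mem_flatMap, List.mem_flatMap]
    constructor
    · rintro ⟨v, hv, hkv⟩
      obtain ⟨h0v, h0k, hdvd⟩ := (mem_fator v k).mp hkv
      refine ⟨(v, (pv.count v : Int)), ?_, hkv⟩
      rw [hps, PySem.Dict.items_counter]
      exact List.mem_map.mpr ⟨v, (PySem.Set.mem_ofList _ _).mpr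
        (List.mem_filter.mpr ⟨hv, by simpa using h0v⟩), rfl⟩
    · rintro ⟨p, hp, hkp⟩
      rw [hps, PySem.Dict.items_counter] at hp
      obtain ⟨v, hv, rfl⟩ := List.mem_map.mp hp
      exact ⟨v, (List.mem_filter.mp ((PySem.Set.mem_ofList _ _).mp hv)).1, hkp⟩
  have hkeysperm : (PySem.Set.ofList L).Perm B.keys :=
    (List.perm_ext_iff_of_nodup (PySem.Set.nodup_ofList L) hnodupB).mpr hmem
  rw [hitemsA, hitemsB]
  exact hkeysperm.map _

theorem final_eq (sf : List (String × Int)) :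
    map_possible_keys sf = map_possible_keys_alt sf := by
  simp only [map_possible_keys, map_possible_keys_alt, fator_number]
  rw [A_dict_eq, B_freq_eq, B_counts_eq]
  exact sorted2_rev_eq_of_perm _ _ (items_perm sf)


-- ===== VERDICT (by name: the statement is the Claim_ definition above) =====
theorem map_possible_keys_spec : Claim_equal_map_possible_keys := by
  intro sequence_frequency _
  unfold Spec_map_possible_keys
  exact final_eq sequence_frequency
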